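-- pv_equiv track=rewrite | github.com/priitahe/vrkpall | main.py | teisenda_tsoonist_tabeliks
-- ===== SOURCE A (Python) =====
-- def teisenda_tsoonist_tabeliks(võistkonnad):
--     """
--     Võtab sisse listi võistkondadest tsooni järjekorras (1.,2.,3.,...)
--     ja tagastab listi turniiri tabeli järjekorras vastavalt kaardistusele:
--       kui 6 võistkonda: {1:5, 2:1, 3:2, 4:3, 5:4, 6:6}
--       kui 5 võistkonda: {1:5, 2:1, 3:2, 4:3, 5:4}
--     (positsioonid 1-põhised)
--     """
--     n = len(võistkonnad)
--     if n == 6: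
--         kaardistus = {1:5, 2:1, 3:2, 4:3, 5:4, 6:6}
--     elif n == 5:
--         kaardistus = {1:5, 2:1, 3:2, 4:3, 5:4}
--     else:
--         raise ValueError("Toetatud ainult 5 või 6 võistkonda selle teisenduse jaoks.")
--
--     uus = [None] * n
--     for tsoon_pos in range(1, n+1):
--         siht_pos = kaardistus[tsoon_pos]  # 1-põhine
--         uus[siht_pos - 1] = võistkonnad[tsoon_pos - 1]
--
--     if any(x is None for x in uus):
--         raise RuntimeError("Teisenduse viga — mõni koht jäi täitmata.")
--     return uus
-- ===== SOURCE B (Python) =====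
-- def teisenda_tsoonist_tabeliks(võistkonnad):
--     n = len(võistkonnad)
--     if n == 6:
--         return võistkonnad[1:5] + võistkonnad[0:1] + võistkonnad[5:6]
--     elif n == 5:
--         return võistkonnad[1:5] + võistkonnad[0:1]
--     raise ValueError("Toetatud ainult 5 või 6 võistkonda selle teisenduse jaoks.")
-- ===== Notes on version B (the rewrite author's own statement) =====
-- stated objective: simpler
-- what changed: Replaces the dict mapping, scatter-write loop into a preallocated None list, and the dead None-check with a closed-form slice rearrangement read in output order.
import Mathlib
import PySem

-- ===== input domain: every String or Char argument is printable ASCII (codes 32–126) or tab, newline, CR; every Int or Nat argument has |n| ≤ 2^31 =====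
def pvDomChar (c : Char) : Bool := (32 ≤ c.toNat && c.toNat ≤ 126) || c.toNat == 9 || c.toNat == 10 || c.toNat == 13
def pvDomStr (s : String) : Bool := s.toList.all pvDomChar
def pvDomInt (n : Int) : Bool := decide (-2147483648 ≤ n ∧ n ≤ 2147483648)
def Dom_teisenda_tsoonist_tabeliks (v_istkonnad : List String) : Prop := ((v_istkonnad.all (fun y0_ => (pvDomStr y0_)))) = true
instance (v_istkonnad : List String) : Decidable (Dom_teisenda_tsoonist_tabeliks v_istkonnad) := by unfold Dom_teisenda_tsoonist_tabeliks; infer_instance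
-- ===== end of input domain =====

-- B replaces A's dict mapping + scatter-write loop (and the dead None-check) with a
-- closed-form slice rearrangement read in output order; objective: simpler.

-- ===== PORT A =====
-- Literal port of A: build the 1-based dict, scatter-write into a None-filled list,
-- then map the Options out. On lists whose length is not 5 or 6 Python raises
-- ValueError; those inputs are outside Pre_ and the port returns [].
def teisenda_tsoonist_tabeliks (v_istkonnad : List String) : List String :=
  let n : Int := (v_istkonnad.length : Int)
  if n = 6 ∨ n = 5 then
    let kaardistus : PySem.Dict Int Int :=
      if n = 6 then PySem.Dict.ofList [(1,5),(2,1),(3,2),(4,3),(5,4),(6,6)]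
      else PySem.Dict.ofList [(1,5),(2,1),(3,2),(4,3),(5,4)]
    let uus : List (Option String) := List.replicate v_istkonnad.length none
    let uus := (PySem.List.pyRange 1 (n+1) 1).foldl (fun acc tsoon_pos =>
      let siht_pos := kaardistus.getD tsoon_pos 0
      acc.set (siht_pos - 1).toNat (PySem.List.pyGet? v_istkonnad (tsoon_pos - 1))) uus
    if uus.any (·.isNone) then []   -- RuntimeError path (unreachable within Pre_)
    else uus.map (fun o => o.getD "")
  else []                           -- ValueError path, outside Pre_

-- ===== PORT B =====
def teisenda_tsoonist_tabeliks_alt (v_istkonnad : List String) : List String :=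
  let n : Int := (v_istkonnad.length : Int)
  if n = 6 then
    PySem.List.slice v_istkonnad (some 1) (some 5) ++
    PySem.List.slice v_istkonnad (some 0) (some 1) ++
    PySem.List.slice v_istkonnad (some 5) (some 6)
  else if n = 5 then
    PySem.List.slice v_istkonnad (some 1) (some 5) ++
    PySem.List.slice v_istkonnad (some 0) (some 1)
  else []                           -- ValueError path, outside Pre_

-- ===== PRECONDITION & SPEC =====
-- A raises ValueError unless the list has exactly 5 or 6 elements.
def Pre_teisenda_tsoonist_tabeliks (v_istkonnad : List String) : Prop :=
  v_istkonnad.length = 5 ∨ v_istkonnad.length = 6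
instance (v_istkonnad : List String) : Decidable (Pre_teisenda_tsoonist_tabeliks v_istkonnad) := by unfold Pre_teisenda_tsoonist_tabeliks; infer_instance
def pvWitness_teisenda_tsoonist_tabeliks : List String := ["a", "b", "c", "d", "e"]
def Spec_teisenda_tsoonist_tabeliks (v_istkonnad : List String) (out : List String) : Prop := out = teisenda_tsoonist_tabeliks_alt v_istkonnad
instance (v_istkonnad : List String) (out : List String) : Decidable (Spec_teisenda_tsoonist_tabeliks v_istkonnad out) := by unfold Spec_teisenda_tsoonist_tabeliks; infer_instance

-- ===== CLAIM (what is proved, stated in full; the proofs are below) =====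
def Claim_equal_teisenda_tsoonist_tabeliks : Prop := ∀ (v_istkonnad : List String), Dom_teisenda_tsoonist_tabeliks v_istkonnad → Pre_teisenda_tsoonist_tabeliks v_istkonnad → Spec_teisenda_tsoonist_tabeliks v_istkonnad (teisenda_tsoonist_tabeliks v_istkonnad)

-- ===== LEMMAS AND PROOFS =====

theorem teisenda_five (a b c d e : String) :
    teisenda_tsoonist_tabeliks [a, b, c, d, e] = teisenda_tsoonist_tabeliks_alt [a, b, c, d, e] := by
  simp [teisenda_tsoonist_tabeliks, teisenda_tsoonist_tabeliks_alt, PySem.List.pyRange,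
        PySem.List.pyGet?, PySem.List.pyIdx?, PySem.List.slice, PySem.Dict.getD, PySem.Dict.get?,
        PySem.Dict.ofList, List.range_succ, List.find?_cons, PySem.Dict.update, PySem.Dict.insert,
        PySem.Dict.empty]

theorem teisenda_six (a b c d e f : String) :
    teisenda_tsoonist_tabeliks [a, b, c, d, e, f] = teisenda_tsoonist_tabeliks_alt [a, b, c, d, e, f] := by
  simp [teisenda_tsoonist_tabeliks, teisenda_tsoonist_tabeliks_alt, PySem.List.pyRange,
        PySem.List.pyGet?, PySem.List.pyIdx?, PySem.List.slice, PySem.Dict.getD, PySem.Dict.get?,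
        PySem.Dict.ofList, List.range_succ, List.find?_cons, PySem.Dict.update, PySem.Dict.insert,
        PySem.Dict.empty]

-- ===== VERDICT (by name: the statement is the Claim_ definition above) =====
theorem teisenda_tsoonist_tabeliks_spec : Claim_equal_teisenda_tsoonist_tabeliks := by
  intro v _ hpre
  unfold Spec_teisenda_tsoonist_tabeliks
  rcases hpre with h | h
  · match v, h with
    | [a, b, c, d, e], _ => exact teisenda_five a b c d e
  · match v, h with
    | [a, b, c, d, e, f], _ => exact teisenda_six a b c d e f
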